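-- pv_equiv track=rewrite | github.com/KevinSGarrett/RastUp | ProjectBlueprint/scripts/concordance/rewrite_crossrefs.py | title_to_id
-- ===== SOURCE A (Python) =====
-- def title_to_id(index_map: dict, title: str) -> str|None:
--     t=title.strip().lower()
--     # exact match first
--     for _id,meta in index_map.items():
--         mt=(meta.get("title") or "").lower()
--         if t==mt: return _id
--     # then contains
--     best=None; bestlen=10**9
--     for _id,meta in index_map.items():
--         mt=(meta.get("title") or "").lower()
--         if t in mt and len(mt)<bestlen:
--             best=_id; bestlen=len(mt)
--     return best
-- ===== SOURCE B (Python) =====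
-- def title_to_id(index_map: dict, title: str) -> str|None:
--     t = title.strip().lower()
--     best = None
--     bestlen = 10**9
--     for _id, meta in index_map.items():
--         mt = (meta.get("title") or "").lower()
--         if t == mt:
--             return _id
--         if t in mt and len(mt) < bestlen:
--             best = _id
--             bestlen = len(mt)
--     return best
-- ===== Notes on version B (the rewrite author's own statement) =====
-- stated objective: simpler
-- what changed: A's two separate full scans (exact pass, then contains pass) are fused into one pass that returns immediately on the first exact match and otherwise tracks the shortest containing title.
import Mathlib
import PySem

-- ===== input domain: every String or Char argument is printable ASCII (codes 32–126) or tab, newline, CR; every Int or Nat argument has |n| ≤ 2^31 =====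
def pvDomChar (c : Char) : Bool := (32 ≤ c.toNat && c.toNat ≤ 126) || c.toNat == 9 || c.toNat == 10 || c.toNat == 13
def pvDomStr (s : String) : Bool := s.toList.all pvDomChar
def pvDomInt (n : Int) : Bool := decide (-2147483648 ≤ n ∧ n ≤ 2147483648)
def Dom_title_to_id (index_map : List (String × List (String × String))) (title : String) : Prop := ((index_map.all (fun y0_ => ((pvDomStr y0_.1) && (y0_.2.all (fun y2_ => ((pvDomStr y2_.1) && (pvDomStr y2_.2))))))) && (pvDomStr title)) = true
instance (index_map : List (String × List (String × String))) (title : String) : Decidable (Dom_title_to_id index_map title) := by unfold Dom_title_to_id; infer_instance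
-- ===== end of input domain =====

-- B fuses A's two scans into a single pass (same exact-first and shortest-containing semantics); objective: simpler, one loop instead of two.

-- ===== PORT A =====
-- mt = (meta.get("title") or "").lower()   ('or ""' keeps "" when the value is falsy)
def pvAMt (md : List (String × String)) : String :=
  let v := PySem.Dict.getD ⟨md⟩ "title" ""
  PySem.Str.lower (if v = "" then "" else v)

-- first loop: 'for _id,md in index_map.items(): if t==mt: return _id'
def pvAExact (t : String) : List (String × List (String × String)) → Option String
  | [] => none
  | (id_, md) :: rest =>
    if t = pvAMt md then some id_ else pvAExact t rest

-- second loop: running (best, bestlen) with bestlen initialised to 10**9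
def pvAStep (t : String) (st : Option String × Int) (p : String × List (String × String)) :
    Option String × Int :=
  let mt := pvAMt p.2
  if PySem.Str.isIn t mt && decide (PySem.Str.len mt < st.2) then (some p.1, PySem.Str.len mt) else st

def pvAContains (t : String) (l : List (String × List (String × String))) : Option String × Int :=
  l.foldl (pvAStep t) (none, 10 ^ 9)

def title_to_id (index_map : List (String × List (String × String))) (title : String) : Option String :=
  let t := PySem.Str.lower (PySem.Str.strip title)
  match pvAExact t index_map with
  | some id_ => some id_
  | none => (pvAContains t index_map).1

-- ===== PORT B =====
def pvBMt (md : List (String × String)) : String :=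
  let v := PySem.Dict.getD ⟨md⟩ "title" ""
  PySem.Str.lower (if v = "" then "" else v)

-- single fused pass: return on exact match, else track shortest containing title
def pvBLoop (t : String) : Option String → Int → List (String × List (String × String)) → Option String
  | best, _, [] => best
  | best, bestlen, (id_, md) :: rest =>
    let mt := pvBMt md
    if t = mt then some id_
    else if PySem.Str.isIn t mt && decide (PySem.Str.len mt < bestlen) then
      pvBLoop t (some id_) (PySem.Str.len mt) rest
    else pvBLoop t best bestlen rest

def title_to_id_alt (index_map : List (String × List (String × String))) (title : String) : Option String :=
  pvBLoop (PySem.Str.lower (PySem.Str.strip title)) none (10 ^ 9) index_map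

-- ===== PRECONDITION & SPEC =====
def Spec_title_to_id (index_map : List (String × List (String × String))) (title : String) (out : Option String) : Prop := out = title_to_id_alt index_map title
instance (index_map : List (String × List (String × String))) (title : String) (out : Option String) : Decidable (Spec_title_to_id index_map title out) := by unfold Spec_title_to_id; infer_instance

-- ===== CLAIM (what is proved, stated in full; the proofs are below) =====
def Claim_equal_title_to_id : Prop := ∀ (index_map : List (String × List (String × String))) (title : String), Dom_title_to_id index_map title → Spec_title_to_id index_map title (title_to_id index_map title)

-- ===== LEMMAS AND PROOFS =====
theorem pvBLoop_eq (t : String) (l : List (String × List (String × String))) :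
    ∀ (best : Option String) (bestlen : Int),
    pvBLoop t best bestlen l =
      match pvAExact t l with
      | some id_ => some id_
      | none => (l.foldl (pvAStep t) (best, bestlen)).1 := by
  induction l with
  | nil => intro best bestlen; rfl
  | cons p rest ih =>
    intro best bestlen
    obtain ⟨id_, md⟩ := p
    show (if t = pvBMt md then some id_
      else if PySem.Str.isIn t (pvBMt md) && decide (PySem.Str.len (pvBMt md) < bestlen) then
        pvBLoop t (some id_) (PySem.Str.len (pvBMt md)) rest
      else pvBLoop t best bestlen rest) = _
    have hmt : pvBMt md = pvAMt md := by unfold pvBMt pvAMt; rfl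
    rw [hmt]
    by_cases hx : t = pvAMt md
    · simp [hx, pvAExact]
    · simp only [if_neg hx, pvAExact, List.foldl_cons]
      by_cases hc : (PySem.Str.isIn t (pvAMt md) && decide (PySem.Str.len (pvAMt md) < bestlen)) = true
      · rw [if_pos hc, ih]
        have hstep : pvAStep t (best, bestlen) (id_, md) = (some id_, PySem.Str.len (pvAMt md)) := by
          simp only [pvAStep, hc, if_true]
        rw [hstep]
      · rw [if_neg hc, ih]
        have hstep : pvAStep t (best, bestlen) (id_, md) = (best, bestlen) := by
          simp only [pvAStep]
          rw [if_neg hc]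
        rw [hstep]

-- ===== VERDICT (by name: the statement is the Claim_ definition above) =====
theorem title_to_id_spec : Claim_equal_title_to_id := by
  intro index_map title _
  show title_to_id index_map title = title_to_id_alt index_map title
  unfold title_to_id title_to_id_alt pvAContains
  rw [pvBLoop_eq]
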